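-- pv_equiv track=rewrite | github.com/UrbsKali/NSI-1-Urbskali | TP/TP_Cryptographie.py | pre_bin
-- ===== SOURCE A (Python) =====
-- def pre_bin(binary):
-- 	tmp = []
-- 	binary = str(binary)
-- 	counter = len(binary) // 8
-- 	while counter != 0:
-- 		if binary[:1] == '0':
-- 			tmp.append(binary[:8])
-- 			binary = binary[8:]
-- 			counter -= 1
-- 		elif binary[:3] == '110':
-- 			tmp.append(binary[:16])
-- 			binary = binary[16:]
-- 			counter -= 2
-- 		elif binary[:4] == '1110':
-- 			tmp.append(binary[:24])
-- 			binary = binary[24:]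
-- 			counter -= 3
-- 		elif binary[:5] == '11110':
-- 			tmp.append(binary[:32])
-- 			binary = binary[32:]
-- 			counter -= 4
-- 		else:
-- 			counter -= 1
-- 			binary = binary[8:]
-- 	return " ".join(val for val in tmp if val != '00000000')
-- ===== SOURCE B (Python) =====
-- def pre_bin(binary):
-- 	binary = str(binary)
-- 	counter = len(binary) // 8
-- 	i = 0
-- 	parts = []
-- 	while counter > 0:
-- 		if binary[i] == '0':
-- 			k = 1
-- 		elif binary[i:i + 3] == '110':
-- 			k = 2
-- 		elif binary[i:i + 4] == '1110':
-- 			k = 3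
-- 		elif binary[i:i + 5] == '11110':
-- 			k = 4
-- 		else:
-- 			counter -= 1
-- 			i += 8
-- 			continue
-- 		chunk = binary[i:i + 8 * k]
-- 		if chunk != '00000000':
-- 			parts.append(chunk)
-- 		i += 8 * k
-- 		counter -= k
-- 	return " ".join(parts)
-- ===== Notes on version B (the rewrite author's own statement) =====
-- stated objective: faster
-- what changed: B scans the fixed string once with an integer index pointer and filters chunks as it goes, instead of A's repeated reslicing of the whole remaining string (binary = binary[8:], …) plus a final filtering pass over the collected chunks.
import Mathlib
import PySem

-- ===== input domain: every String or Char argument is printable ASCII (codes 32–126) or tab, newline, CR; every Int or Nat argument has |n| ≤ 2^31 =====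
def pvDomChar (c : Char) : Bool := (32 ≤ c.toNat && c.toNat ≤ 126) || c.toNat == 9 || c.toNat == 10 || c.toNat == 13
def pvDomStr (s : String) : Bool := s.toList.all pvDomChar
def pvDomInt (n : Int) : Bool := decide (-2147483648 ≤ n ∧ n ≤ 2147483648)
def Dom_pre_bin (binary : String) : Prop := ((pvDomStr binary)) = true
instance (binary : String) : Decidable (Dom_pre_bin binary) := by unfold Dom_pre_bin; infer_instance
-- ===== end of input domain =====

-- B replaces A's O(n^2) repeated reslicing of the remaining string by a single O(n) pass with
-- an integer index pointer, filtering '00000000' chunks as they are produced instead of afterwards.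


-- ===== PORT A =====
-- A's while loop: tmp accumulates chunks, 'binary' is resliced, 'counter' decreases by 1..4 each
-- iteration.  Python's condition is 'counter != 0'; when counter overshoots below 0 the Python
-- loop never terminates (it returns no value there), so the port stops at counter ≤ 0; wherever
-- the Python loop does return, counter hits 0 exactly and the port computes the same value.
def preBinLoopA (binary : List Char) (counter : Int) (tmp : List (List Char)) :
    List (List Char) :=
  if counter ≤ 0 then tmp
  else if PySem.List.slice binary none (some 1) = "0".toList then
    preBinLoopA (PySem.List.slice binary (some 8) none) (counter - 1)
      (tmp ++ [PySem.List.slice binary none (some 8)])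
  else if PySem.List.slice binary none (some 3) = "110".toList then
    preBinLoopA (PySem.List.slice binary (some 16) none) (counter - 2)
      (tmp ++ [PySem.List.slice binary none (some 16)])
  else if PySem.List.slice binary none (some 4) = "1110".toList then
    preBinLoopA (PySem.List.slice binary (some 24) none) (counter - 3)
      (tmp ++ [PySem.List.slice binary none (some 24)])
  else if PySem.List.slice binary none (some 5) = "11110".toList then
    preBinLoopA (PySem.List.slice binary (some 32) none) (counter - 4)
      (tmp ++ [PySem.List.slice binary none (some 32)])
  else
    preBinLoopA (PySem.List.slice binary (some 8) none) (counter - 1) tmp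
termination_by counter.toNat
decreasing_by all_goals omega

def pre_bin (binary : String) : String :=
  let cs := binary.toList
  let counter := PySem.Int.floordiv (cs.length : Int) 8
  let tmp := preBinLoopA cs counter []
  String.ofList (PySem.Chars.join " ".toList (tmp.filter (fun val => val ≠ "00000000".toList)))

-- ===== PORT B =====
-- B's while loop: the string is never resliced; i is the index pointer, chunks that are not
-- '00000000' are appended to parts directly.
def preBinLoopB (s : List Char) (counter : Int) (i : Int) (parts : List (List Char)) :
    List (List Char) :=
  if counter ≤ 0 then parts
  else if PySem.List.pyGet? s i = some '0' then
    let chunk := PySem.List.slice s (some i) (some (i + 8))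
    preBinLoopB s (counter - 1) (i + 8)
      (if chunk ≠ "00000000".toList then parts ++ [chunk] else parts)
  else if PySem.List.slice s (some i) (some (i + 3)) = "110".toList then
    let chunk := PySem.List.slice s (some i) (some (i + 16))
    preBinLoopB s (counter - 2) (i + 16)
      (if chunk ≠ "00000000".toList then parts ++ [chunk] else parts)
  else if PySem.List.slice s (some i) (some (i + 4)) = "1110".toList then
    let chunk := PySem.List.slice s (some i) (some (i + 24))
    preBinLoopB s (counter - 3) (i + 24)
      (if chunk ≠ "00000000".toList then parts ++ [chunk] else parts)
  else if PySem.List.slice s (some i) (some (i + 5)) = "11110".toList then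
    let chunk := PySem.List.slice s (some i) (some (i + 32))
    preBinLoopB s (counter - 4) (i + 32)
      (if chunk ≠ "00000000".toList then parts ++ [chunk] else parts)
  else
    preBinLoopB s (counter - 1) (i + 8) parts
termination_by counter.toNat
decreasing_by all_goals omega

def pre_bin_alt (binary : String) : String :=
  let cs := binary.toList
  let counter := PySem.Int.floordiv (cs.length : Int) 8
  String.ofList (PySem.Chars.join " ".toList (preBinLoopB cs counter 0 []))

-- ===== PRECONDITION & SPEC =====
def Spec_pre_bin (binary : String) (out : String) : Prop := out = pre_bin_alt binary
instance (binary : String) (out : String) : Decidable (Spec_pre_bin binary out) := by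
  unfold Spec_pre_bin; infer_instance

-- ===== CLAIM (what is proved, stated in full; the proofs are below) =====
def Claim_equal_pre_bin : Prop :=
  ∀ (binary : String), Dom_pre_bin binary → Spec_pre_bin binary (pre_bin binary)

-- ===== LEMMAS AND PROOFS =====

lemma pv_take_one_iff (xs : List Char) (c : Char) :
    xs.take 1 = [c] ↔ xs.head? = some c := by
  cases xs <;> simp

-- B's slice at index pointer ↑(8*u) is the canonical (drop _).take _
lemma pv_sliceB (s : List Char) (u : Nat) (c : Int) (hc : 0 ≤ c) :
    PySem.List.slice s (some ((8 * u : Nat) : Int)) (some (((8 * u : Nat) : Int) + c))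
      = (s.drop (8 * u)).take c.toNat := by
  rw [PySem.List.slice_toNat s (by positivity) (by omega)]
  (congr 1; omega)

-- the main loop correspondence: A's shrinking-string loop, filtered, is B's index loop
lemma pv_zero_list : "0".toList = ['0'] := rfl

lemma pv_loop_eq (n : Nat) : ∀ (counter : Int), counter.toNat ≤ n →
    ∀ (s : List Char) (u : Nat) (acc : List (List Char)),
    (preBinLoopA (s.drop (8 * u)) counter acc).filter (fun val => val ≠ "00000000".toList)
      = preBinLoopB s counter ((8 * u : Nat) : Int)
          (acc.filter (fun val => val ≠ "00000000".toList)) := by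
  induction n with
  | zero =>
    intro c hc s u acc
    rw [preBinLoopA, preBinLoopB, if_pos (by omega : c ≤ 0), if_pos (by omega : c ≤ 0)]
  | succ n ih =>
    intro c hc s u acc
    by_cases h0 : c ≤ 0
    · rw [preBinLoopA, preBinLoopB, if_pos h0, if_pos h0]
    · rw [preBinLoopA, preBinLoopB, if_neg h0, if_neg h0]
      simp only [pv_sliceB s u 3 (by norm_num), pv_sliceB s u 4 (by norm_num),
        pv_sliceB s u 5 (by norm_num), pv_sliceB s u 8 (by norm_num),
        pv_sliceB s u 16 (by norm_num), pv_sliceB s u 24 (by norm_num),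
        pv_sliceB s u 32 (by norm_num),
        PySem.List.slice_to (s.drop (8 * u)) (show (0:Int) ≤ 1 by norm_num),
        PySem.List.slice_to (s.drop (8 * u)) (show (0:Int) ≤ 3 by norm_num),
        PySem.List.slice_to (s.drop (8 * u)) (show (0:Int) ≤ 4 by norm_num),
        PySem.List.slice_to (s.drop (8 * u)) (show (0:Int) ≤ 5 by norm_num),
        PySem.List.slice_to (s.drop (8 * u)) (show (0:Int) ≤ 8 by norm_num),
        PySem.List.slice_to (s.drop (8 * u)) (show (0:Int) ≤ 16 by norm_num),
        PySem.List.slice_to (s.drop (8 * u)) (show (0:Int) ≤ 24 by norm_num),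
        PySem.List.slice_to (s.drop (8 * u)) (show (0:Int) ≤ 32 by norm_num),
        PySem.List.slice_from (s.drop (8 * u)) (show (0:Int) ≤ 8 by norm_num),
        PySem.List.slice_from (s.drop (8 * u)) (show (0:Int) ≤ 16 by norm_num),
        PySem.List.slice_from (s.drop (8 * u)) (show (0:Int) ≤ 24 by norm_num),
        PySem.List.slice_from (s.drop (8 * u)) (show (0:Int) ≤ 32 by norm_num),
        PySem.List.pyGet?_natCast]
      have t1 : ((1 : Int)).toNat = 1 := rfl
      have t3 : ((3 : Int)).toNat = 3 := rfl
      have t4 : ((4 : Int)).toNat = 4 := rfl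
      have t5 : ((5 : Int)).toNat = 5 := rfl
      have t8 : ((8 : Int)).toNat = 8 := rfl
      have t16 : ((16 : Int)).toNat = 16 := rfl
      have t24 : ((24 : Int)).toNat = 24 := rfl
      have t32 : ((32 : Int)).toNat = 32 := rfl
      have e8 : ((8 * u : Nat) : Int) + 8 = ((8 * (u + 1) : Nat) : Int) := by push_cast; ring
      have e16 : ((8 * u : Nat) : Int) + 16 = ((8 * (u + 2) : Nat) : Int) := by push_cast; ring
      have e24 : ((8 * u : Nat) : Int) + 24 = ((8 * (u + 3) : Nat) : Int) := by push_cast; ring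
      have e32 : ((8 * u : Nat) : Int) + 32 = ((8 * (u + 4) : Nat) : Int) := by push_cast; ring
      have d8 : (s.drop (8 * u)).drop 8 = s.drop (8 * (u + 1)) := by
        rw [List.drop_drop]; congr 1
      have d16 : (s.drop (8 * u)).drop 16 = s.drop (8 * (u + 2)) := by
        rw [List.drop_drop]; congr 1
      have d24 : (s.drop (8 * u)).drop 24 = s.drop (8 * (u + 3)) := by
        rw [List.drop_drop]; congr 1
      have d32 : (s.drop (8 * u)).drop 32 = s.drop (8 * (u + 4)) := by
        rw [List.drop_drop]; congr 1
      simp only [t1, t3, t4, t5, t8, t16, t24, t32, e8, e16, e24, e32, d8, d16, d24, d32,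
        ← List.head?_drop,
        ← pv_take_one_iff, pv_zero_list]
      split_ifs <;>
        (rw [ih _ (by omega)]; try (congr 1; simp_all [List.filter_append]))

theorem pre_bin_equal_all (binary : String) :
    pre_bin binary = pre_bin_alt binary := by
  have h := pv_loop_eq (PySem.Int.floordiv (binary.toList.length : Int) 8).toNat
    _ le_rfl binary.toList 0 []
  simp only [Nat.mul_zero, Nat.cast_zero, List.drop_zero, List.filter_nil] at h
  simp only [pre_bin, pre_bin_alt]
  rw [h]

-- ===== VERDICT (by name: the statement is the Claim_ definition above) =====
theorem pre_bin_spec : Claim_equal_pre_bin := by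
  intro binary _
  unfold Spec_pre_bin
  exact pre_bin_equal_all binary
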